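-- pv_equiv track=rewrite | github.com/Jukipuki/kopiika-ai | backend/app/agents/pattern_detection/detectors/recurring.py | _classify_cadence
-- ===== SOURCE A (Python) =====
-- _MONTHLY_GAP_MIN_DAYS = 25
--
-- _MONTHLY_GAP_MAX_DAYS = 35
--
-- _ANNUAL_GAP_MIN_DAYS = 358
--
-- _ANNUAL_GAP_MAX_DAYS = 372
--
-- def _classify_gap(gap_days: int) -> str | None:
--     if _MONTHLY_GAP_MIN_DAYS <= gap_days <= _MONTHLY_GAP_MAX_DAYS:
--         return "monthly"
--     if _ANNUAL_GAP_MIN_DAYS <= gap_days <= _ANNUAL_GAP_MAX_DAYS: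
--         return "annual"
--     return None
--
-- def _classify_cadence(gaps: list[int]) -> str | None:
--     """Classify a merchant's cadence from its inter-transaction gaps.
--
--     Rules:
--       * Every gap must fall into the same bucket (monthly or annual). A single
--         off-bucket gap disqualifies the merchant.
--       * At least one gap must qualify (i.e. ≥ 1 transaction pair at cadence).
--       * For merchants with 3+ transactions (≥ 2 gaps), the two-consecutive
--         guard is naturally enforced because all gaps must agree.
--
--     Returns 'monthly', 'annual', or None.
--     """
--     if not gaps:
--         return None
--     buckets = [_classify_gap(g) for g in gaps]
--     distinct = {b for b in buckets if b is not None}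
--     if len(distinct) != 1:
--         return None
--     if any(b is None for b in buckets):
--         return None
--     return distinct.pop()
-- ===== SOURCE B (Python) =====
-- _MONTHLY_GAP_MIN_DAYS = 25
-- _MONTHLY_GAP_MAX_DAYS = 35
-- _ANNUAL_GAP_MIN_DAYS = 358
-- _ANNUAL_GAP_MAX_DAYS = 372
--
--
-- def _bucket(gap_days):
--     if _MONTHLY_GAP_MIN_DAYS <= gap_days <= _MONTHLY_GAP_MAX_DAYS:
--         return "monthly"
--     if _ANNUAL_GAP_MIN_DAYS <= gap_days <= _ANNUAL_GAP_MAX_DAYS: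
--         return "annual"
--     return None
--
--
-- def _classify_cadence(gaps):
--     cadence = None
--     for g in gaps:
--         b = _bucket(g)
--         if b is None:
--             return None
--         if cadence is None:
--             cadence = b
--         elif cadence != b:
--             return None
--     return cadence
-- ===== Notes on version B (the rewrite author's own statement) =====
-- stated objective: simpler
-- what changed: Replaces the three-pass body (bucket list, distinct set, any-None scan) with one pass over the gaps keeping a single running cadence variable and returning None early on the first off-bucket or conflicting gap.
import Mathlib
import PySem

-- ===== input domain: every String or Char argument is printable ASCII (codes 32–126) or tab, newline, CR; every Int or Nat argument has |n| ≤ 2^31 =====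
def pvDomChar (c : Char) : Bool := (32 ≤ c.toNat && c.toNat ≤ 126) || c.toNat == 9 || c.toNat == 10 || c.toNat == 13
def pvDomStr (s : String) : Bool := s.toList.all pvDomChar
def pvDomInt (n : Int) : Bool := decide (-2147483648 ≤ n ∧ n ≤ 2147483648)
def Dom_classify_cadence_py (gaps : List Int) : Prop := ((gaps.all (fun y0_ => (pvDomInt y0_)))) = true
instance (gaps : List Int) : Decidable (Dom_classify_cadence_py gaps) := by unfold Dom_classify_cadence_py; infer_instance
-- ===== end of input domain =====

-- B replaces A's three-pass collect-and-aggregate body (bucket list, distinct set,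
-- any-None scan) with a single pass over the gaps that keeps one running cadence
-- variable and returns early; objective: simpler.

-- ===== PORT A =====
def classify_gap_py (gap_days : Int) : Option String :=
  if 25 ≤ gap_days ∧ gap_days ≤ 35 then some "monthly"
  else if 358 ≤ gap_days ∧ gap_days ≤ 372 then some "annual"
  else none

def classify_cadence_py (gaps : List Int) : Option String :=
  if gaps = [] then none
  else
    let buckets := gaps.map classify_gap_py
    let distinct : PySem.Set String := PySem.Set.ofList (buckets.filterMap (fun b => b))
    if distinct.length ≠ 1 then none
    else if buckets.any (fun b => b = none) then none
    -- distinct.pop(): len(distinct) == 1 here, so popping the singleton set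
    -- yields its unique element — ported as head? (order-independent).
    else distinct.head?

-- ===== PORT B =====
def bucket_alt (gap_days : Int) : Option String :=
  if 25 ≤ gap_days ∧ gap_days ≤ 35 then some "monthly"
  else if 358 ≤ gap_days ∧ gap_days ≤ 372 then some "annual"
  else none

def classify_cadence_go (gaps : List Int) (cadence : Option String) : Option String :=
  match gaps with
  | [] => cadence
  | g :: rest =>
    match bucket_alt g with
    | none => none
    | some b =>
      match cadence with
      | none => classify_cadence_go rest (some b)
      | some c => if c ≠ b then none else classify_cadence_go rest (some c)

def classify_cadence_py_alt (gaps : List Int) : Option String :=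
  classify_cadence_go gaps none

-- ===== PRECONDITION & SPEC =====
def Spec_classify_cadence_py (gaps : List Int) (out : Option String) : Prop := out = classify_cadence_py_alt gaps
instance (gaps : List Int) (out : Option String) : Decidable (Spec_classify_cadence_py gaps out) := by unfold Spec_classify_cadence_py; infer_instance

-- ===== CLAIM (what is proved, stated in full; the proofs are below) =====
def Claim_equal_classify_cadence_py : Prop := ∀ (gaps : List Int), Dom_classify_cadence_py gaps → Spec_classify_cadence_py gaps (classify_cadence_py gaps)

-- ===== LEMMAS AND PROOFS =====

theorem bucket_alt_eq (g : Int) : bucket_alt g = classify_gap_py g := rfl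

-- B returns none as soon as some gap is off-bucket, whatever the accumulator is.
theorem go_none_of_mem (gaps : List Int) (acc : Option String)
    (h : ∃ x ∈ gaps, classify_gap_py x = none) :
    classify_cadence_go gaps acc = none := by
  induction gaps generalizing acc with
  | nil => rcases h with ⟨x, hx, _⟩; cases hx
  | cons g rest ih =>
    rcases h with ⟨x, hx, hxn⟩
    simp only [classify_cadence_go, bucket_alt_eq]
    rcases List.mem_cons.mp hx with rfl | hx'
    · rw [hxn]
    · cases hb : classify_gap_py g with
      | none => rfl
      | some b =>
        cases acc with
        | none => exact ih _ ⟨x, hx', hxn⟩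
        | some c =>
          by_cases hcb : c = b
          · simp [hcb, ih _ ⟨x, hx', hxn⟩]
          · simp [hcb]

-- With the accumulator set, B checks that every remaining gap is in the same bucket.
theorem go_some (gaps : List Int) (c : String) :
    classify_cadence_go gaps (some c)
      = if ∀ x ∈ gaps, classify_gap_py x = some c then some c else none := by
  induction gaps with
  | nil => simp [classify_cadence_go]
  | cons g rest ih =>
    simp only [classify_cadence_go, bucket_alt_eq]
    cases hb : classify_gap_py g with
    | none => simp [hb]
    | some b =>
      by_cases hcb : c = b
      · subst hcb
        simp [ih, hb]
      · simp only [hcb, not_false_iff, ne_eq, if_true]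
        have : ¬ ∀ x ∈ g :: rest, classify_gap_py x = some c := by
          intro h
          have := h g (List.mem_cons_self ..)
          rw [hb] at this
          exact hcb (Option.some.inj this).symm
        simp only [this, if_false]

theorem filterMap_id_all_some {l : List (Option String)} {c : String}
    (h : ∀ b ∈ l, b = some c) :
    l.filterMap (fun b => b) = List.replicate l.length c := by
  induction l with
  | nil => rfl
  | cons b t ih =>
    have hb := h b (List.mem_cons_self ..)
    subst hb
    simp [ih (fun x hx => h x (List.mem_cons_of_mem _ hx)), List.replicate_succ]

theorem ofList_replicate_succ (n : Nat) (c : String) :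
    PySem.Set.ofList (List.replicate (n + 1) c) = [c] := by
  have key : ∀ m : Nat, List.foldl PySem.Set.add [c] (List.replicate m c) = [c] := by
    intro m
    induction m with
    | zero => rfl
    | succ k ihk => simpa [List.replicate_succ, PySem.Set.add] using ihk
  calc PySem.Set.ofList (List.replicate (n + 1) c)
      = List.foldl PySem.Set.add [] (List.replicate (n + 1) c) := PySem.Set.ofList_eq_foldl _
    _ = [c] := by simpa [List.replicate_succ, PySem.Set.add, PySem.Set.empty] using key n

-- ===== VERDICT (by name: the statement is the Claim_ definition above) =====
theorem classify_cadence_py_spec : Claim_equal_classify_cadence_py := by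
  intro gaps _
  unfold Spec_classify_cadence_py classify_cadence_py classify_cadence_py_alt
  cases gaps with
  | nil => rfl
  | cons g gs =>
    rw [if_neg (List.cons_ne_nil g gs)]
    by_cases hnone : ∃ x ∈ g :: gs, classify_gap_py x = none
    · rw [go_none_of_mem _ _ hnone]
      simp
      intro _ hg hgs
      rcases hnone with ⟨x, hx, hxn⟩
      rcases List.mem_cons.mp hx with rfl | hx'
      · exact absurd hxn hg
      · exact absurd hxn (hgs x hx')
    · push Not at hnone
      cases hb : classify_gap_py g with
      | none => exact absurd hb (hnone g (List.mem_cons_self ..))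
      | some c =>
        simp only [classify_cadence_go, bucket_alt_eq, hb]
        rw [go_some]
        by_cases hall : ∀ x ∈ gs, classify_gap_py x = some c
        · have hallb : ∀ b ∈ (g :: gs).map classify_gap_py, b = some c := by
            intro b hbmem
            rcases List.mem_map.mp hbmem with ⟨x, hx, rfl⟩
            rcases List.mem_cons.mp hx with rfl | hx'
            · exact hb
            · exact hall x hx'
          rw [if_pos hall]
          have hfm := filterMap_id_all_some hallb
          have hlen : ((g :: gs).map classify_gap_py).length = gs.length + 1 := by
            simp
          rw [hlen] at hfm
          simp only [hfm, ofList_replicate_succ]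
          simp
          exact ⟨by simp [hb], fun x hx => by simp [hall x hx]⟩
        · rw [if_neg hall]
          push Not at hall
          obtain ⟨y, hy, hyne⟩ := hall
          cases hby : classify_gap_py y with
          | none => exact absurd hby (hnone y (List.mem_cons_of_mem _ hy))
          | some c' =>
            have hcc : c' ≠ c := fun h => hyne (by rw [hby, h])
            have hc : c ∈ PySem.Set.ofList (((g :: gs).map classify_gap_py).filterMap (fun b => b)) := by
              rw [PySem.Set.mem_ofList]
              exact List.mem_filterMap.mpr ⟨some c, List.mem_map.mpr ⟨g, List.mem_cons_self .., hb⟩, rfl⟩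
            have hc' : c' ∈ PySem.Set.ofList (((g :: gs).map classify_gap_py).filterMap (fun b => b)) := by
              rw [PySem.Set.mem_ofList]
              exact List.mem_filterMap.mpr ⟨some c', List.mem_map.mpr ⟨y, List.mem_cons_of_mem _ hy, hby⟩, rfl⟩
            have h1 : (PySem.Set.ofList (((g :: gs).map classify_gap_py).filterMap (fun b => b))).length ≠ 1 := by
              intro hlen
              obtain ⟨a, ha⟩ := List.length_eq_one_iff.mp hlen
              rw [ha, List.mem_singleton] at hc hc'
              exact hcc (hc'.trans hc.symm)
            simp only [List.map_cons] at h1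
            simp [h1]
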